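-- pv_equiv track=rewrite | github.com/beWanja/codepath-tech-int-prep-102 | unit2-prac/standard2.py | max_audience_performances
-- ===== SOURCE A (Python) =====
-- def max_audience_performances(audiences):
--     aud_map = {}
--     for i in range(len(audiences)):
--         if audiences[i] in aud_map:
--             aud_map[audiences[i]] += 1
--         else:
--             aud_map[audiences[i]] = 1
--
--     max_audience = max(aud_map.keys())
--     for aud_size, freq in aud_map.items():
--         if aud_size == max_audience:
--             return aud_size*freq
-- ===== SOURCE B (Python) =====
-- def max_audience_performances(audiences):
--     best = audiences[0]
--     freq = 1
--     for x in audiences[1:]: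
--         if x > best:
--             best, freq = x, 1
--         elif x == best:
--             freq += 1
--     return best * freq
-- ===== Notes on version B (the rewrite author's own statement) =====
-- stated objective: faster
-- what changed: B replaces A's two-stage table approach (build a frequency dict over all elements, take max of its keys, scan the dict items for that key) with one fused scan carrying a running maximum and its running frequency, resetting the frequency when a strictly larger element appears; no dict is built or iterated.
import Mathlib
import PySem

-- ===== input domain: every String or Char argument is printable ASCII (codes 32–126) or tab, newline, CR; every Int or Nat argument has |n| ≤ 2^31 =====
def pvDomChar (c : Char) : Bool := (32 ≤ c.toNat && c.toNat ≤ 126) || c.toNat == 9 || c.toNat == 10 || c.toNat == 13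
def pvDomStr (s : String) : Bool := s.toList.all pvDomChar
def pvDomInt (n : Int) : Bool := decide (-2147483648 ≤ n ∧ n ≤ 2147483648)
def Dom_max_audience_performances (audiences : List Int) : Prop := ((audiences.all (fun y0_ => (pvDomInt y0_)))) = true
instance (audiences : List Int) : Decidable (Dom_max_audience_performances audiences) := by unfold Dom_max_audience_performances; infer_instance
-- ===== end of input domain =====

-- B replaces A's frequency-dict + max-key + item-scan pipeline with one fused scan carrying (running max, running frequency).

-- ===== PORT A =====
def max_audience_performances (audiences : List Int) : Int :=
  let aud_map : PySem.Dict Int Int :=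
    (PySem.List.pyRange 0 audiences.length 1).foldl (fun d i =>
      let x := PySem.List.pyGetD audiences i 0
      if d.contains x then d.modify x 0 (· + 1) else d.insert x 1) PySem.Dict.empty
  match PySem.List.max? aud_map.keys (fun y => y) with
  | none => 0   -- unreachable under Pre_ (Python raises ValueError on empty input)
  | some max_audience =>
    match aud_map.items.find? (fun kv => kv.1 == max_audience) with
    | some kv => kv.1 * kv.2
    | none => 0   -- unreachable: max_audience is a key

-- ===== PORT B =====
def max_audience_performances_alt (audiences : List Int) : Int :=
  match audiences with
  | [] => 0   -- unreachable under Pre_ (audiences[0] raises IndexError on empty input)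
  | h :: t =>
    let r := t.foldl (fun (p : Int × Int) x =>
      if x > p.1 then (x, 1) else if x = p.1 then (p.1, p.2 + 1) else p) (h, 1)
    r.1 * r.2

-- ===== PRECONDITION & SPEC =====
-- Pre_ excludes only the empty list, on which both Pythons raise (A: ValueError from max(); B: IndexError).
def Pre_max_audience_performances (audiences : List Int) : Prop := audiences ≠ []
instance (audiences : List Int) : Decidable (Pre_max_audience_performances audiences) := by unfold Pre_max_audience_performances; infer_instance
def pvWitness_max_audience_performances : List Int := [3, 3, 5]

def Spec_max_audience_performances (audiences : List Int) (out : Int) : Prop := out = max_audience_performances_alt audiences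
instance (audiences : List Int) (out : Int) : Decidable (Spec_max_audience_performances audiences out) := by unfold Spec_max_audience_performances; infer_instance

-- ===== CLAIM (what is proved, stated in full; the proofs are below) =====
def Claim_equal_max_audience_performances : Prop := ∀ (audiences : List Int), Dom_max_audience_performances audiences → Pre_max_audience_performances audiences → Spec_max_audience_performances audiences (max_audience_performances audiences)

-- ===== LEMMAS AND PROOFS =====

-- one step of A's loop (test-then-modify-or-insert) IS one step of Counter
theorem step_eq (d : PySem.Dict Int Int) (x : Int) :
    (if d.contains x then d.modify x 0 (· + 1) else d.insert x 1) = d.modify x 0 (· + 1) := by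
  by_cases h : d.contains x = true
  · simp [h]
  · have hg : d.getD x 0 = 0 := by
      simp [PySem.Dict.getD, (PySem.Dict.get?_eq_none_iff_contains d x).mpr (by simpa using h)]
    simp [h, PySem.Dict.modify, hg]

-- A's indexed counting loop builds exactly Counter(audiences)
theorem audMap_eq_counter (xs : List Int) :
    (PySem.List.pyRange 0 xs.length 1).foldl (fun d i =>
      let x := PySem.List.pyGetD xs i 0
      if d.contains x then d.modify x 0 (· + 1) else d.insert x 1) PySem.Dict.empty
    = PySem.Dict.counter xs := by
  have h1 := PySem.List.foldl_pyRange_pyGetD xs 0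
      (fun (d : PySem.Dict Int Int) x =>
        if d.contains x then d.modify x 0 (· + 1) else d.insert x 1)
      PySem.Dict.empty (a := 0) le_rfl
  simp only [PySem.List.len, Int.toNat_zero, List.drop_zero] at h1
  rw [h1]
  simp only [step_eq]
  rfl

theorem max_keys_counter (xs : List Int) (hne : xs ≠ []) :
    PySem.List.max? (PySem.Dict.counter xs).keys (fun y => y) = PySem.List.max? xs (fun y => y) := by
  rw [PySem.Dict.keys_counter]
  cases h1 : PySem.List.max? (PySem.Set.ofList xs) (fun y => y) with
  | none =>
    exfalso
    have := (PySem.List.max?_eq_none_iff _ _).mp h1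
    rcases List.exists_mem_of_ne_nil xs hne with ⟨y, hy⟩
    exact absurd ((PySem.Set.mem_ofList xs y).mpr hy) (by simp [this])
  | some m1 =>
    cases h2 : PySem.List.max? xs (fun y => y) with
    | none =>
      exact absurd ((PySem.List.max?_eq_none_iff _ _).mp h2) hne
    | some m2 =>
      have hm1 : m1 ∈ xs := (PySem.Set.mem_ofList xs m1).mp (PySem.List.max?_mem h1)
      have hm2 : m2 ∈ PySem.Set.ofList xs := (PySem.Set.mem_ofList xs m2).mpr (PySem.List.max?_mem h2)
      exact congrArg some
        (le_antisymm (PySem.List.max?_isMax h2 m1 hm1) (PySem.List.max?_isMax h1 m2 hm2))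

-- first key-match in a key-tagged map is the key itself
theorem find_map_key (l : List Int) (g : Int → Int) (m : Int) (hm : m ∈ l) :
    (l.map (fun k => (k, g k))).find? (fun kv => kv.1 == m) = some (m, g m) := by
  induction l with
  | nil => cases hm
  | cons k t ih =>
    by_cases hk : k = m
    · subst hk; simp
    · have hmt : m ∈ t := by cases hm with
        | head => exact absurd rfl hk
        | tail _ h => exact h
      simpa [hk] using ih hmt

theorem find_items_counter (xs : List Int) (m : Int) (hm : m ∈ xs) :
    (PySem.Dict.counter xs).items.find? (fun kv => kv.1 == m) = some (m, (xs.count m : Int)) := by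
  rw [PySem.Dict.items_counter]
  rw [find_map_key _ _ m ((PySem.Set.mem_ofList xs m).mpr hm)]

-- B's fused scan computes the running max together with the count of that max
theorem fold_spec (t : List Int) (b c : Int) :
    t.foldl (fun (p : Int × Int) x =>
      if x > p.1 then (x, 1) else if x = p.1 then (p.1, p.2 + 1) else p) (b, c)
    = (t.foldl max b,
       if t.foldl max b = b then c + (t.count b : Int) else (t.count (t.foldl max b) : Int)) := by
  induction t generalizing b c with
  | nil => simp
  | cons x t ih =>
    simp only [List.foldl_cons, List.count_cons, beq_iff_eq]
    by_cases h1 : x > b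
    · rw [if_pos h1, ih x 1, max_eq_right (le_of_lt h1)]
      have hbM : b < t.foldl max x := lt_of_lt_of_le h1 (PySem.List.le_foldl_max t x).1
      refine Prod.ext rfl ?_
      by_cases h2 : t.foldl max x = x
      · rw [h2] at hbM ⊢
        split_ifs <;> push_cast <;> omega
      · split_ifs <;> push_cast <;> omega
    · rw [if_neg h1]
      have hxb : x ≤ b := not_lt.mp h1
      have hb := (PySem.List.le_foldl_max t b).1
      rw [max_eq_left hxb]
      by_cases h2 : x = b
      · rw [if_pos h2, ih b (c + 1), h2]
        refine Prod.ext rfl ?_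
        split_ifs <;> push_cast <;> omega
      · rw [if_neg h2, ih b c]
        refine Prod.ext rfl ?_
        split_ifs <;> push_cast <;> omega

-- ===== VERDICT (by name: the statement is the Claim_ definition above) =====
theorem max_audience_performances_spec : Claim_equal_max_audience_performances := by
  intro xs _ hpre
  unfold Spec_max_audience_performances max_audience_performances max_audience_performances_alt
  simp only [audMap_eq_counter]
  rw [max_keys_counter xs hpre]
  match xs, hpre with
  | h :: t, _ =>
    rw [PySem.List.max?_id_cons]
    have hm : t.foldl max h ∈ h :: t := PySem.List.max?_mem (PySem.List.max?_id_cons h t)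
    simp only [find_items_counter (h :: t) _ hm, fold_spec, List.count_cons, beq_iff_eq]
    congr 1
    by_cases hc : t.foldl max h = h
    · rw [hc]
      split_ifs <;> push_cast <;> omega
    · split_ifs <;> push_cast <;> omega
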